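-- pv_equiv track=rewrite | github.com/puma10/todo | import_external_tasks.py | insert_into_section
-- ===== SOURCE A (Python) =====
-- from typing import Any, Dict, List, Sequence
--
-- def find_section_indices(lines: List[str], section: str) -> tuple[int, int]:
--     section_idx = -1
--     insert_idx = len(lines)
--     for idx, line in enumerate(lines):
--         stripped = line.strip()
--         if not stripped:
--             continue
--         if line.lstrip() != line:
--             continue
--         if stripped == section:
--             section_idx = idx
--             next_idx = len(lines)
--             for j in range(idx + 1, len(lines)):
--                 next_line = lines[j]
--                 next_stripped = next_line.strip()
--                 if not next_stripped:
--                     continue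
--                 if next_line.lstrip() == next_line:
--                     next_idx = j
--                     break
--             insert_idx = next_idx
--             break
--     return section_idx, insert_idx
--
-- def insert_into_section(lines: List[str], section: str, block: List[str]) -> List[str]:
--     new_lines = list(lines)
--     if not new_lines:
--         new_lines = []
--     section_idx, insert_idx = find_section_indices(new_lines, section)
--
--     if section_idx == -1:
--         if new_lines and new_lines[-1].strip():
--             new_lines.append("")
--         new_lines.append(section)
--         new_lines.append("")
--         insert_idx = len(new_lines)
--     else:
--         if insert_idx > 0 and new_lines[insert_idx - 1].strip():
--             new_lines.insert(insert_idx, "")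
--             insert_idx += 1
--
--     for line in block:
--         new_lines.insert(insert_idx, line)
--         insert_idx += 1
--
--     if insert_idx < len(new_lines) and new_lines[insert_idx].strip():
--         new_lines.insert(insert_idx, "")
--
--     return new_lines
-- ===== SOURCE B (Python) =====
-- def insert_into_section(lines, section, block):
--     """One linear pass: copy lines, splicing the block at the section boundary."""
--
--     def is_top(line):
--         return line.strip() != "" and line.lstrip() == line
--
--     out = []
--     state = 0  # 0: header not seen yet; 1: inside the section; 2: block already spliced
--     prev = None
--     for line in lines:
--         if state == 0 and is_top(line) and line.strip() == section:
--             state = 1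
--         elif state == 1 and is_top(line):
--             # next top-level header: splice the block right before it
--             if prev.strip():
--                 out.append("")
--             out.extend(block)
--             out.append("")  # `line` is a top-level header, hence non-blank
--             state = 2
--         out.append(line)
--         prev = line
--     if state == 0:
--         # section not found: append it (blank-separated) at the end
--         if prev is not None and prev.strip():
--             out.append("")
--         out.extend([section, ""])
--         out.extend(block)
--     elif state == 1:
--         # section ran to EOF: splice at the end, no trailing blank
--         if prev.strip():
--             out.append("")
--         out.extend(block)
--     return out
-- ===== Notes on version B (the rewrite author's own statement) =====
-- stated objective: simpler
-- what changed: B replaces A's two-phase approach (find_section_indices with nested enumerate/range scans computing section_idx/insert_idx, then repeated list.insert into a copy plus boundary inserts) with a single linear state-machine pass that copies each line into the output and splices the block, with its blank-line padding, directly at the section boundary.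
import Mathlib
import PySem

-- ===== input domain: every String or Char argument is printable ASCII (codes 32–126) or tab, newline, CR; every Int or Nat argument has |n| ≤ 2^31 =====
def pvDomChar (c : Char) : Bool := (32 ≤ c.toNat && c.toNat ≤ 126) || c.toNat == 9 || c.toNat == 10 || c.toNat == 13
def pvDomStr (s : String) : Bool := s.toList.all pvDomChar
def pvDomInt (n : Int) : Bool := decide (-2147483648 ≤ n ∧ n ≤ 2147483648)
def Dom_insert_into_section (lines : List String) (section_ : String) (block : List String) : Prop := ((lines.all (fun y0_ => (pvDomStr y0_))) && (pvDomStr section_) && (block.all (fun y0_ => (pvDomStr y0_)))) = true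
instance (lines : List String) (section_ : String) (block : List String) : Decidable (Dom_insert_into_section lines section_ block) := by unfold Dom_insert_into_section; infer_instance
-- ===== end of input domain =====

-- B replaces A's precomputed indices + repeated list.insert with a single recursive pass
-- that splices the block at the section boundary (objective: simpler decomposition).

-- ===== PORT A =====
-- inner loop of find_section_indices: for j in range(idx+1, len(lines)), with break
def pvFsiInner : List String → Nat → Nat → Nat
  | [], _, dflt => dflt
  | l :: rest, j, dflt =>
    if PySem.Str.strip l = "" then pvFsiInner rest (j + 1) dflt
    else if PySem.Str.lstrip l = l then j
    else pvFsiInner rest (j + 1) dflt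

-- outer loop of find_section_indices: for idx, line in enumerate(lines), with break
def pvFsiOuter : List String → Nat → Nat → String → Int × Nat
  | [], _, dflt, _ => (-1, dflt)
  | l :: rest, idx, dflt, s =>
    if PySem.Str.strip l = "" then pvFsiOuter rest (idx + 1) dflt s
    else if PySem.Str.lstrip l ≠ l then pvFsiOuter rest (idx + 1) dflt s
    else if PySem.Str.strip l = s then ((idx : Int), pvFsiInner rest (idx + 1) dflt)
    else pvFsiOuter rest (idx + 1) dflt s

def find_section_indices (lines : List String) (s : String) : Int × Nat :=
  pvFsiOuter lines 0 lines.length s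

-- for line in block: new_lines.insert(insert_idx, line); insert_idx += 1
def pvInsBlock (block : List String) (st : List String × Nat) : List String × Nat :=
  block.foldl (fun st line => (PySem.List.insert st.1 (st.2 : Int) line, st.2 + 1)) st

def insert_into_section (lines : List String) (section_ : String) (block : List String) : List String :=
  let new_lines := lines
  let p := find_section_indices new_lines section_
  let st :=
    if p.1 = -1 then
      let nl1 := if new_lines ≠ [] ∧ PySem.Str.strip ((PySem.List.pyGet? new_lines (-1)).getD "") ≠ ""
                 then new_lines ++ [""] else new_lines
      let nl2 := nl1 ++ [section_] ++ [""]
      pvInsBlock block (nl2, nl2.length)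
    else
      let q := if p.2 > 0 ∧ PySem.Str.strip ((PySem.List.pyGet? new_lines ((p.2 - 1 : Nat) : Int)).getD "") ≠ ""
               then (PySem.List.insert new_lines (p.2 : Int) "", p.2 + 1)
               else (new_lines, p.2)
      pvInsBlock block q
  if st.2 < st.1.length ∧ PySem.Str.strip ((PySem.List.pyGet? st.1 (st.2 : Int)).getD "") ≠ ""
  then PySem.List.insert st.1 (st.2 : Int) ""
  else st.1

-- ===== PORT B =====
def pvIsTop (l : String) : Bool := !(PySem.Str.strip l == "") && (PySem.Str.lstrip l == l)

-- loop body of B: state 0 = header not seen, 1 = inside the section, 2 = block spliced;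
-- `prev.strip()` is only reached with prev a string, ported as prev.getD ""
def pvStep (s : String) (block : List String) (st : List String × Nat × Option String)
    (line : String) : List String × Nat × Option String :=
  if st.2.1 = 0 ∧ pvIsTop line ∧ PySem.Str.strip line = s then
    (st.1 ++ [line], 1, some line)
  else if st.2.1 = 1 ∧ pvIsTop line then
    ((st.1 ++ (if PySem.Str.strip (st.2.2.getD "") ≠ "" then [""] else []) ++ block ++ [""])
      ++ [line], 2, some line)
  else (st.1 ++ [line], st.2.1, some line)

-- code after B's loop
def pvFinish (s : String) (block : List String) (st : List String × Nat × Option String) :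
    List String :=
  if st.2.1 = 0 then
    st.1 ++ (match st.2.2 with
             | none => []
             | some p => if PySem.Str.strip p ≠ "" then [""] else []) ++ [s, ""] ++ block
  else if st.2.1 = 1 then
    st.1 ++ (if PySem.Str.strip (st.2.2.getD "") ≠ "" then [""] else []) ++ block
  else st.1

def insert_into_section_alt (lines : List String) (section_ : String) (block : List String) : List String :=
  pvFinish section_ block (lines.foldl (pvStep section_ block) ([], 0, none))

-- ===== PRECONDITION & SPEC =====
def Spec_insert_into_section (lines : List String) (section_ : String) (block : List String) (out : List String) : Prop := out = insert_into_section_alt lines section_ block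
instance (lines : List String) (section_ : String) (block : List String) (out : List String) : Decidable (Spec_insert_into_section lines section_ block out) := by unfold Spec_insert_into_section; infer_instance

-- ===== CLAIM (what is proved, stated in full; the proofs are below) =====
def Claim_equal_insert_into_section : Prop := ∀ (lines : List String) (section_ : String) (block : List String), Dom_insert_into_section lines section_ block → Spec_insert_into_section lines section_ block (insert_into_section lines section_ block)

-- ===== LEMMAS AND PROOFS =====

-- recursive characterization of B's single pass (proof device)
def pvTail (block : List String) : List String → String → List String
  | r :: rs, prev =>
    if !pvIsTop r then r :: pvTail block rs r
    else (if PySem.Str.strip prev ≠ "" then [""] else []) ++ block ++ [""] ++ (r :: rs)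
  | [], prev => (if PySem.Str.strip prev ≠ "" then [""] else []) ++ block

def pvWalk (s : String) (block : List String) : List String → Option String → List String
  | [], prev =>
    (match prev with
     | none => []
     | some p => if PySem.Str.strip p ≠ "" then [""] else []) ++ [s, ""] ++ block
  | h :: t, _ =>
    if pvIsTop h && (PySem.Str.strip h == s) then h :: pvTail block t h
    else h :: pvWalk s block t (some h)
def pvCnt (v : List String) : Nat := (v.takeWhile (fun l => !pvIsTop l)).length

def pvMatched (s l : String) : Bool := pvIsTop l && (PySem.Str.strip l == s)

theorem pvCnt_cons_top {r : String} (rs : List String) (h : pvIsTop r = true) :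
    pvCnt (r :: rs) = 0 := by simp [pvCnt, h]

theorem pvCnt_cons_not {r : String} (rs : List String) (h : pvIsTop r = false) :
    pvCnt (r :: rs) = pvCnt rs + 1 := by simp [pvCnt, h]

theorem pvFsiInner_eq (v : List String) (j : Nat) :
    pvFsiInner v j (j + v.length) = j + pvCnt v := by
  induction v generalizing j with
  | nil => simp [pvFsiInner, pvCnt]
  | cons r rs ih =>
    have e : j + (r :: rs).length = (j + 1) + rs.length := by simp; omega
    by_cases h1 : PySem.Str.strip r = ""
    · rw [pvCnt_cons_not rs (by simp [pvIsTop, h1])]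
      simp only [pvFsiInner, if_pos h1]
      rw [e, ih (j + 1)]; omega
    · by_cases h2 : PySem.Str.lstrip r = r
      · rw [pvCnt_cons_top rs (by simp [pvIsTop, h1, h2])]
        simp [pvFsiInner, h1, h2]
      · rw [pvCnt_cons_not rs (by simp [pvIsTop, h2])]
        simp only [pvFsiInner, if_neg h1, if_neg h2]
        rw [e, ih (j + 1)]; omega

theorem pvInsBlock_eq (block : List String) (xs : List String) (p : Nat) (hp : p ≤ xs.length) :
    pvInsBlock block (xs, p) = (xs.take p ++ block ++ xs.drop p, p + block.length) := by
  induction block generalizing xs p with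
  | nil => simp [pvInsBlock]
  | cons b bs ih =>
    simp only [pvInsBlock, List.foldl_cons]
    rw [PySem.List.insert_natCast xs p b hp]
    have h1 : p + 1 ≤ (xs.take p ++ b :: xs.drop p).length := by
      simp; omega
    have step := ih (xs.take p ++ b :: xs.drop p) (p + 1) h1
    simp only [pvInsBlock] at step
    rw [step]
    have ht : (xs.take p ++ b :: xs.drop p).take (p + 1) = xs.take p ++ [b] := by
      rw [List.take_append]
      simp [List.length_take, Nat.min_eq_left hp, List.take_succ_cons]
    have hd : (xs.take p ++ b :: xs.drop p).drop (p + 1) = xs.drop p := by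
      rw [List.drop_append]
      simp [List.length_take, Nat.min_eq_left hp]
    rw [ht, hd]
    simp
    omega

theorem pvFsiOuter_none (t : List String) (idx dflt : Nat) (s : String)
    (h : ∀ l ∈ t, pvMatched s l = false) :
    pvFsiOuter t idx dflt s = (-1, dflt) := by
  induction t generalizing idx with
  | nil => simp [pvFsiOuter]
  | cons r rs ih =>
    have hr := h r (by simp)
    have hrs : ∀ l ∈ rs, pvMatched s l = false := fun l hl => h l (by simp [hl])
    by_cases h1 : PySem.Str.strip r = ""
    · simp [pvFsiOuter, h1, ih (idx+1) hrs]
    · by_cases h2 : PySem.Str.lstrip r = r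
      · by_cases h3 : PySem.Str.strip r = s
        · exfalso
          simp [pvMatched, pvIsTop, h2, h3] at hr
          exact h1 (h3.trans hr)
        · simp [pvFsiOuter, h1, h2, h3, ih (idx+1) hrs]
      · simp [pvFsiOuter, h1, h2, ih (idx+1) hrs]

theorem pvFsiOuter_found (u : List String) (hd : String) (v : List String) (idx dflt : Nat)
    (s : String) (hu : ∀ l ∈ u, pvMatched s l = false) (hh : pvMatched s hd = true) :
    pvFsiOuter (u ++ hd :: v) idx dflt s
      = (((idx + u.length : Nat) : Int), pvFsiInner v (idx + u.length + 1) dflt) := by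
  induction u generalizing idx with
  | nil =>
    simp only [pvMatched, pvIsTop, Bool.and_eq_true, beq_iff_eq, Bool.not_eq_true',
      beq_eq_false_iff_ne] at hh
    obtain ⟨⟨h1, h2⟩, h3⟩ := hh
    simp only [List.nil_append, pvFsiOuter, if_neg h1,
      if_neg (show ¬(PySem.Str.lstrip hd ≠ hd) by simp [h2]), if_pos h3]
    simp
  | cons r rs ih =>
    have hr := hu r (by simp)
    have hrs : ∀ l ∈ rs, pvMatched s l = false := fun l hl => hu l (by simp [hl])
    have step := ih (idx + 1) hrs
    have e : idx + 1 + rs.length = idx + (rs.length + 1) := by omega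
    rw [e] at step
    simp only [List.cons_append, List.length_cons]
    by_cases h1 : PySem.Str.strip r = ""
    · simp only [pvFsiOuter, if_pos h1]
      rw [step]
    · by_cases h2 : PySem.Str.lstrip r = r
      · by_cases h3 : PySem.Str.strip r = s
        · exfalso
          simp [pvMatched, pvIsTop, h2, h3] at hr
          exact h1 (h3.trans hr)
        · simp only [pvFsiOuter, if_neg h1,
            if_neg (show ¬(PySem.Str.lstrip r ≠ r) by simp [h2]), if_neg h3]
          rw [step]
      · simp only [pvFsiOuter, if_neg h1, if_pos h2]
        rw [step]

theorem pvWalk_none (s : String) (block : List String) (t : List String) (prev : Option String)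
    (h : ∀ l ∈ t, pvMatched s l = false) :
    pvWalk s block t prev
      = t ++ (match t.getLast?.or prev with
              | none => []
              | some p => if PySem.Str.strip p ≠ "" then [""] else []) ++ [s, ""] ++ block := by
  induction t generalizing prev with
  | nil => simp [pvWalk]
  | cons r rs ih =>
    have hr := h r (by simp)
    have hrs : ∀ l ∈ rs, pvMatched s l = false := fun l hl => h l (by simp [hl])
    have hlast : (r :: rs).getLast?.or prev = rs.getLast?.or (some r) := by
      cases rs with
      | nil => simp
      | cons a as =>
        obtain ⟨y, hy⟩ := Option.isSome_iff_exists.mp (List.getLast?_isSome.mpr (by simp) :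
          (a :: as).getLast?.isSome)
        rw [List.getLast?_cons_cons, hy]
        simp
    rw [hlast]
    simp only [pvWalk, pvMatched] at hr ⊢
    rw [if_neg (by simp [hr])]
    rw [ih (some r) hrs]
    simp

theorem pvWalk_found (s : String) (block : List String) (u : List String) (hd : String)
    (v : List String) (prev : Option String)
    (hu : ∀ l ∈ u, pvMatched s l = false) (hh : pvMatched s hd = true) :
    pvWalk s block (u ++ hd :: v) prev = u ++ hd :: pvTail block v hd := by
  induction u generalizing prev with
  | nil =>
    simp only [List.nil_append, pvWalk, pvMatched] at hh ⊢
    rw [if_pos hh]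
  | cons r rs ih =>
    have hr := hu r (by simp)
    have hrs : ∀ l ∈ rs, pvMatched s l = false := fun l hl => hu l (by simp [hl])
    simp only [List.cons_append, pvWalk, pvMatched] at hr ⊢
    rw [if_neg (by simp [hr]), ih (some r) hrs]

theorem pvTail_eq (block : List String) (v : List String) (prev : String) :
    pvTail block v prev
      = v.take (pvCnt v)
        ++ (if PySem.Str.strip ((v.take (pvCnt v)).getLastD prev) ≠ "" then [""] else [])
        ++ block
        ++ (if pvCnt v < v.length then [""] else [])
        ++ v.drop (pvCnt v) := by
  induction v generalizing prev with
  | nil => simp [pvTail, pvCnt]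
  | cons r rs ih =>
    by_cases hr : pvIsTop r = true
    · rw [pvCnt_cons_top rs hr]
      simp only [pvTail, hr]
      simp
    · have hr' : pvIsTop r = false := by simpa using hr
      rw [pvCnt_cons_not rs hr']
      simp only [pvTail, hr']
      rw [ih r]
      simp only [List.take_succ_cons, List.getLastD_cons, List.drop_succ_cons,
        List.length_cons, List.cons_append]
      simp

def spliceFound (block lines : List String) (m : Nat) : List String :=
  lines.take m
    ++ (if PySem.Str.strip (lines.getD (m - 1) "") ≠ "" then [""] else [])
    ++ block
    ++ (if m < lines.length ∧ PySem.Str.strip (lines.getD m "") ≠ "" then [""] else [])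
    ++ lines.drop m

-- generic finish step shared by the two found-subcases:
-- st = (take m lines ++ lead ++ block ++ drop m lines, m + lead.length + block.length)

theorem found_finish (lines lead block : List String) (m : Nat) (hm : m ≤ lines.length) :
    (if m + lead.length + block.length < (lines.take m ++ lead ++ block ++ lines.drop m).length ∧
        PySem.Str.strip ((PySem.List.pyGet? (lines.take m ++ lead ++ block ++ lines.drop m)
          ((m + lead.length + block.length : Nat) : Int)).getD "") ≠ ""
     then PySem.List.insert (lines.take m ++ lead ++ block ++ lines.drop m)
          ((m + lead.length + block.length : Nat) : Int) ""
     else lines.take m ++ lead ++ block ++ lines.drop m)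
    = lines.take m ++ lead ++ block
        ++ (if m < lines.length ∧ PySem.Str.strip (lines.getD m "") ≠ "" then [""] else [])
        ++ lines.drop m := by
  have hpre : (lines.take m ++ lead ++ block).length = m + lead.length + block.length := by
    simp; omega
  have hlen : (lines.take m ++ lead ++ block ++ lines.drop m).length
      = m + lead.length + block.length + (lines.length - m) := by
    simp; omega
  have hget : (PySem.List.pyGet? (lines.take m ++ lead ++ block ++ lines.drop m)
      ((m + lead.length + block.length : Nat) : Int)).getD ""
      = lines.getD m "" := by
    rw [PySem.List.pyGet?_natCast]
    rw [show lines.take m ++ lead ++ block ++ lines.drop m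
        = (lines.take m ++ lead ++ block) ++ lines.drop m by simp]
    rw [List.getElem?_append_right (hpre.le)]
    rw [hpre, Nat.sub_self, List.getElem?_drop, Nat.add_zero]
    simp [List.getD]
  rw [hget, hlen]
  by_cases hc : m < lines.length ∧ PySem.Str.strip (lines.getD m "") ≠ ""
  · rw [if_pos (by exact ⟨by omega, hc.2⟩), if_pos hc]
    rw [show ((m + lead.length + block.length : Nat) : Int)
        = ((lines.take m ++ lead ++ block).length : Int) by rw [hpre]]
    rw [PySem.List.insert_natCast _ _ _ (by simp)]
    rw [List.take_left, List.drop_left]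
    simp
  · have hneg : ¬(m + lead.length + block.length < m + lead.length + block.length + (lines.length - m) ∧
        PySem.Str.strip (lines.getD m "") ≠ "") := by
      intro hcc; exact hc ⟨by omega, hcc.2⟩
    rw [if_neg hneg, if_neg hc]
    simp

theorem insert_into_section_found (lines : List String) (s : String) (block : List String)
    (idx : Int) (m : Nat) (hfsi : find_section_indices lines s = (idx, m))
    (hidx : 0 ≤ idx) (hm1 : 1 ≤ m) (hm : m ≤ lines.length) :
    insert_into_section lines s block = spliceFound block lines m := by
  have hne : idx ≠ -1 := by omega
  simp only [insert_into_section, hfsi, if_neg hne]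
  have hget : (PySem.List.pyGet? lines ((m - 1 : Nat) : Int)).getD "" = lines.getD (m - 1) "" := by
    rw [PySem.List.pyGet?_natCast]; simp [List.getD]
  by_cases hC : PySem.Str.strip (lines.getD (m - 1) "") ≠ ""
  · rw [hget, if_pos (show m > 0 ∧ PySem.Str.strip (lines.getD (m - 1) "") ≠ "" from ⟨by omega, hC⟩)]
    rw [PySem.List.insert_natCast lines m "" hm]
    have hlive : m + 1 ≤ (lines.take m ++ "" :: lines.drop m).length := by
      simp; omega
    rw [pvInsBlock_eq block _ (m + 1) hlive]
    have ht : (lines.take m ++ "" :: lines.drop m).take (m + 1) = lines.take m ++ [""] := by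
      rw [List.take_append]
      simp [Nat.min_eq_left hm]
    have hd : (lines.take m ++ "" :: lines.drop m).drop (m + 1) = lines.drop m := by
      rw [List.drop_append]
      simp [Nat.min_eq_left hm]
    rw [ht, hd]
    have hff := found_finish lines [""] block m hm
    simp only [List.length_singleton] at hff
    rw [hff]
    simp only [spliceFound]
    rw [if_pos hC]
  · rw [hget, if_neg (show ¬(m > 0 ∧ PySem.Str.strip (lines.getD (m - 1) "") ≠ "") from
        fun hcc => hC hcc.2)]
    rw [pvInsBlock_eq block lines m hm]
    have hff := found_finish lines [] block m hm
    simp only [List.append_nil, List.length_nil, Nat.add_zero] at hff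
    rw [hff]
    simp only [spliceFound, if_neg hC]
    simp

theorem insert_into_section_notfound (lines : List String) (s : String) (block : List String)
    (d : Nat) (hfsi : find_section_indices lines s = (-1, d)) :
    insert_into_section lines s block
      = lines ++ (match lines.getLast? with
                  | none => []
                  | some p => if PySem.Str.strip p ≠ "" then [""] else []) ++ [s, ""] ++ block := by
  have key : ∀ nl2 : List String,
      pvInsBlock block (nl2, nl2.length) = (nl2 ++ block, nl2.length + block.length) := by
    intro nl2
    rw [pvInsBlock_eq block nl2 nl2.length le_rfl]
    simp
  simp only [insert_into_section, hfsi]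
  rw [if_pos (trivial : True), PySem.List.pyGet?_neg_one, key]
  by_cases hL : lines = []
  · subst hL
    simp
    exact fun h _ => absurd h (by omega)
  · obtain ⟨y, hy⟩ := Option.isSome_iff_exists.mp (List.getLast?_isSome.mpr hL)
    rw [hy]
    simp only [Option.getD_some]
    by_cases hs : PySem.Str.strip y ≠ ""
    · rw [if_pos (show lines ≠ [] ∧ PySem.Str.strip y ≠ "" from ⟨hL, hs⟩)]
      split_ifs with h
      · exact absurd h.1 (by simp; omega)
      · simp
    · rw [if_neg (show ¬(lines ≠ [] ∧ PySem.Str.strip y ≠ "") from fun hcc => hs hcc.2)]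
      split_ifs with h
      · exact absurd h.1 (by simp; omega)
      · simp

theorem pvCnt_le (v : List String) : pvCnt v ≤ v.length :=
  (List.takeWhile_sublist _).length_le

theorem pvCnt_top (v : List String) (h : pvCnt v < v.length) :
    pvIsTop (v.getD (pvCnt v) "") = true := by
  induction v with
  | nil => simp [pvCnt] at h
  | cons r rs ih =>
    by_cases hr : pvIsTop r = true
    · simpa [pvCnt_cons_top rs hr] using hr
    · rw [pvCnt_cons_not rs (by simpa using hr)] at h ⊢
      simp only [List.length_cons] at h
      simpa [List.getD] using ih (by omega)

theorem take_getLastD (v : List String) (k : Nat) (h0 : String) (hk : k ≤ v.length) :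
    (v.take k).getLastD h0 = (h0 :: v).getD k "" := by
  induction v generalizing k h0 with
  | nil => simp [Nat.le_zero.mp hk]
  | cons x xs ih =>
    cases k with
    | zero => simp
    | succ n =>
      simp only [List.take_succ_cons, List.getLastD_cons]
      rw [ih n x (by simpa using hk)]
      simp [List.getD]

theorem pvIsTop_strip_ne {l : String} (h : pvIsTop l = true) : PySem.Str.strip l ≠ "" := by
  simp [pvIsTop] at h
  exact h.1

theorem main_eq (lines : List String) (s : String) (block : List String) :
    insert_into_section lines s block = pvWalk s block lines none := by
  rcases hsplit : lines.dropWhile (fun l => !pvMatched s l) with _ | ⟨hd, v⟩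
  · -- no matching header anywhere
    have hall : ∀ l ∈ lines, pvMatched s l = false := by
      intro l hl
      have hl' : l ∈ lines.takeWhile (fun l => !pvMatched s l) := by
        rw [← List.takeWhile_append_dropWhile (p := fun l => !pvMatched s l) (l := lines),
          hsplit, List.append_nil] at hl
        exact hl
      simpa using List.mem_takeWhile_imp hl'
    rw [insert_into_section_notfound lines s block lines.length
      (pvFsiOuter_none lines 0 lines.length s hall)]
    rw [pvWalk_none s block lines none hall]
    rw [Option.or_none]
  · -- the section header is hd
    have hdecomp : lines = lines.takeWhile (fun l => !pvMatched s l) ++ hd :: v := by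
      conv_lhs => rw [← List.takeWhile_append_dropWhile (p := fun l => !pvMatched s l) (l := lines)]
      rw [hsplit]
    set u := lines.takeWhile (fun l => !pvMatched s l) with hu
    have humem : ∀ l ∈ u, pvMatched s l = false := by
      intro l hl
      simpa using List.mem_takeWhile_imp hl
    have hmatch : pvMatched s hd = true := by
      have h := List.head?_dropWhile_not (fun l => !pvMatched s l) lines
      rw [hsplit] at h
      simpa using h
    have hcnt := pvCnt_le v
    have hlenl : lines.length = u.length + 1 + v.length := by
      rw [hdecomp]; simp; omega
    have hfsi : find_section_indices lines s
        = ((u.length : Int), u.length + 1 + pvCnt v) := by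
      unfold find_section_indices
      rw [show (lines : List String) = u ++ hd :: v from hdecomp]
      rw [pvFsiOuter_found u hd v 0 ((u ++ hd :: v).length) s humem hmatch]
      have einner : pvFsiInner v (0 + u.length + 1) (u ++ hd :: v).length
          = u.length + 1 + pvCnt v := by
        have h2 := pvFsiInner_eq v (u.length + 1)
        rw [show (u ++ hd :: v).length = (u.length + 1) + v.length from by simp; omega]
        simpa [Nat.add_comm] using h2
      rw [einner]
      simp
    have hm : u.length + 1 + pvCnt v ≤ lines.length := by omega
    rw [insert_into_section_found lines s block (u.length : Int) (u.length + 1 + pvCnt v) hfsi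
      (by positivity) (by omega) hm]
    rw [show (lines : List String) = u ++ hd :: v from hdecomp,
      pvWalk_found s block u hd v none humem hmatch, pvTail_eq]
    rw [← hdecomp]
    -- component computations
    have htake : lines.take (u.length + 1 + pvCnt v) = u ++ hd :: v.take (pvCnt v) := by
      conv_lhs => rw [hdecomp]
      rw [List.take_append]
      rw [List.take_of_length_le (by omega)]
      congr 1
      rw [show u.length + 1 + pvCnt v - u.length = pvCnt v + 1 from by omega,
        List.take_succ_cons]
    have hprev : lines.getD (u.length + 1 + pvCnt v - 1) ""
        = (v.take (pvCnt v)).getLastD hd := by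
      conv_lhs => rw [hdecomp]
      rw [show u.length + 1 + pvCnt v - 1 = u.length + pvCnt v from by omega]
      rw [List.getD_append_right u (hd :: v) "" (u.length + pvCnt v) (by omega)]
      rw [show u.length + pvCnt v - u.length = pvCnt v from by omega]
      rw [take_getLastD v (pvCnt v) hd hcnt]
    have hdrop : lines.drop (u.length + 1 + pvCnt v) = v.drop (pvCnt v) := by
      conv_lhs => rw [hdecomp]
      rw [List.drop_append]
      rw [List.drop_of_length_le (by omega)]
      rw [show u.length + 1 + pvCnt v - u.length = pvCnt v + 1 from by omega,
        List.drop_succ_cons]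
      simp
    have htrail : (u.length + 1 + pvCnt v < lines.length ∧
        PySem.Str.strip (lines.getD (u.length + 1 + pvCnt v) "") ≠ "")
        ↔ pvCnt v < v.length := by
      constructor
      · intro hc; omega
      · intro hc
        refine ⟨by omega, ?_⟩
        have hg : lines.getD (u.length + 1 + pvCnt v) "" = v.getD (pvCnt v) "" := by
          conv_lhs => rw [hdecomp]
          rw [List.getD_append_right u (hd :: v) "" _ (by omega)]
          rw [show u.length + 1 + pvCnt v - u.length = pvCnt v + 1 from by omega,
            List.getD_cons_succ]
        rw [hg]
        exact pvIsTop_strip_ne (pvCnt_top v hc)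
    unfold spliceFound
    rw [htake, hprev, hdrop, if_congr htrail rfl rfl]
    simp

theorem pvFold_state2 (s : String) (block : List String) (t : List String)
    (out : List String) (prev : Option String) :
    pvFinish s block (t.foldl (pvStep s block) (out, 2, prev)) = out ++ t := by
  induction t generalizing out prev with
  | nil => simp [pvFinish]
  | cons r rs ih =>
    simp only [List.foldl_cons, pvStep]
    rw [if_neg (by simp), if_neg (by simp)]
    rw [ih (out ++ [r]) (some r)]
    simp

theorem pvFold_state1 (s : String) (block : List String) (v : List String)
    (out : List String) (p : String) :
    pvFinish s block (v.foldl (pvStep s block) (out, 1, some p)) = out ++ pvTail block v p := by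
  induction v generalizing out p with
  | nil => simp [pvFinish, pvTail]
  | cons r rs ih =>
    simp only [List.foldl_cons, pvStep]
    by_cases hr : pvIsTop r = true
    · rw [if_neg (by simp), if_pos (by simp [hr])]
      rw [pvFold_state2 s block rs _ (some r)]
      simp only [pvTail, hr]
      simp
    · rw [if_neg (by simp), if_neg (by simp [hr])]
      rw [ih (out ++ [r]) r]
      simp only [pvTail, (by simpa using hr : pvIsTop r = false)]
      simp

theorem pvFold_state0 (s : String) (block : List String) (t : List String)
    (out : List String) (prev : Option String) :
    pvFinish s block (t.foldl (pvStep s block) (out, 0, prev))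
      = out ++ pvWalk s block t prev := by
  induction t generalizing out prev with
  | nil => cases prev <;> simp [pvFinish, pvWalk]
  | cons h tl ih =>
    simp only [List.foldl_cons, pvStep]
    by_cases hm : pvIsTop h = true ∧ PySem.Str.strip h = s
    · rw [if_pos (by simp [hm.1, hm.2])]
      rw [pvFold_state1 s block tl (out ++ [h]) h]
      simp only [pvWalk]
      rw [if_pos (by simp [hm.1, hm.2])]
      simp
    · rw [if_neg (by simp; exact fun h1 h2 => hm ⟨h1, h2⟩), if_neg (by simp)]
      rw [ih (out ++ [h]) (some h)]
      simp only [pvWalk]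
      rw [if_neg (by simp; exact fun h1 h2 => hm ⟨h1, h2⟩)]
      simp

-- ===== VERDICT (by name: the statement is the Claim_ definition above) =====
theorem insert_into_section_spec : Claim_equal_insert_into_section := by
  intro lines section_ block _
  unfold Spec_insert_into_section insert_into_section_alt
  rw [pvFold_state0 section_ block lines [] none, List.nil_append]
  exact main_eq lines section_ block
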